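-- pv_equiv track=rewrite | github.com/wiziswiz/flight-search-agent | scripts/search-awards.py | _airport_region
-- ===== SOURCE A (Python) =====
-- REGION_AIRPORTS = {
--     'US': ['LAX', 'SFO', 'JFK', 'ORD', 'DFW', 'ATL', 'DEN', 'SEA', 'BOS',
--            'MIA', 'PHX', 'LAS', 'MCO', 'BWI', 'DCA', 'IAD', 'CLT', 'PHL',
--            'EWR', 'IAH', 'MSP', 'DTW', 'SAN', 'TPA', 'SLC', 'HNL', 'AUS',
--            'RDU', 'BNA', 'PDX', 'STL', 'SMF', 'SJC', 'OAK', 'FLL', 'PIT'],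
--     'Europe': ['LHR', 'CDG', 'FRA', 'AMS', 'FCO', 'MAD', 'BCN', 'MUC',
--                'ZRH', 'VIE', 'CPH', 'OSL', 'ARN', 'HEL', 'LIS', 'DUB',
--                'BRU', 'MXP', 'ATH', 'WAW', 'PRG', 'BUD'],
--     'Japan': ['NRT', 'HND', 'ITM', 'KIX', 'CTS', 'FUK', 'NGO'],
--     'Asia': ['NRT', 'HND', 'ICN', 'PVG', 'PEK', 'BKK', 'SIN', 'HKG',
--              'KUL', 'MNL', 'DEL', 'BOM', 'TPE', 'SGN', 'HAN'],
--     'UK': ['LHR', 'LGW', 'STN', 'LTN', 'MAN', 'EDI'],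
--     'Middle East': ['DXB', 'DOH', 'AUH', 'KWI', 'JED', 'RUH', 'AMM', 'TLV'],
--     'Oceania': ['SYD', 'MEL', 'BNE', 'AKL', 'PER'],
--     'South America': ['GRU', 'EZE', 'BOG', 'LIM', 'SCL', 'GIG'],
--     'Central America': ['CUN', 'MEX', 'SJO', 'PTY'],
--     'Africa': ['JNB', 'CPT', 'NBO', 'ADD', 'CAI', 'CMN'],
-- }
--
-- def _airport_region(code):
--     """Return the region for an airport code. More specific wins (Japan > Asia)."""
--     # Check specific regions first
--     for region in ['Japan', 'UK', 'Middle East', 'Central America']: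
--         if code in REGION_AIRPORTS.get(region, []):
--             return region
--     for region in ['US', 'Europe', 'Asia', 'Oceania', 'South America', 'Africa']:
--         if code in REGION_AIRPORTS.get(region, []):
--             return region
--     return 'Other'
-- ===== SOURCE B (Python) =====
-- # Flat, priority-resolved code->region table: each airport appears once with its
-- # winning region (Japan > Asia, UK > Europe), so the lookup is one dict.get.
-- _CODE_TO_REGION = {
--     'LAX': 'US', 'SFO': 'US', 'JFK': 'US', 'ORD': 'US',
--     'DFW': 'US', 'ATL': 'US', 'DEN': 'US', 'SEA': 'US',
--     'BOS': 'US', 'MIA': 'US', 'PHX': 'US', 'LAS': 'US',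
--     'MCO': 'US', 'BWI': 'US', 'DCA': 'US', 'IAD': 'US',
--     'CLT': 'US', 'PHL': 'US', 'EWR': 'US', 'IAH': 'US',
--     'MSP': 'US', 'DTW': 'US', 'SAN': 'US', 'TPA': 'US',
--     'SLC': 'US', 'HNL': 'US', 'AUS': 'US', 'RDU': 'US',
--     'BNA': 'US', 'PDX': 'US', 'STL': 'US', 'SMF': 'US',
--     'SJC': 'US', 'OAK': 'US', 'FLL': 'US', 'PIT': 'US',
--     'LHR': 'UK', 'CDG': 'Europe', 'FRA': 'Europe', 'AMS': 'Europe',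
--     'FCO': 'Europe', 'MAD': 'Europe', 'BCN': 'Europe', 'MUC': 'Europe',
--     'ZRH': 'Europe', 'VIE': 'Europe', 'CPH': 'Europe', 'OSL': 'Europe',
--     'ARN': 'Europe', 'HEL': 'Europe', 'LIS': 'Europe', 'DUB': 'Europe',
--     'BRU': 'Europe', 'MXP': 'Europe', 'ATH': 'Europe', 'WAW': 'Europe',
--     'PRG': 'Europe', 'BUD': 'Europe', 'NRT': 'Japan', 'HND': 'Japan',
--     'ITM': 'Japan', 'KIX': 'Japan', 'CTS': 'Japan', 'FUK': 'Japan',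
--     'NGO': 'Japan', 'ICN': 'Asia', 'PVG': 'Asia', 'PEK': 'Asia',
--     'BKK': 'Asia', 'SIN': 'Asia', 'HKG': 'Asia', 'KUL': 'Asia',
--     'MNL': 'Asia', 'DEL': 'Asia', 'BOM': 'Asia', 'TPE': 'Asia',
--     'SGN': 'Asia', 'HAN': 'Asia', 'LGW': 'UK', 'STN': 'UK',
--     'LTN': 'UK', 'MAN': 'UK', 'EDI': 'UK', 'DXB': 'Middle East',
--     'DOH': 'Middle East', 'AUH': 'Middle East', 'KWI': 'Middle East', 'JED': 'Middle East',
--     'RUH': 'Middle East', 'AMM': 'Middle East', 'TLV': 'Middle East', 'SYD': 'Oceania',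
--     'MEL': 'Oceania', 'BNE': 'Oceania', 'AKL': 'Oceania', 'PER': 'Oceania',
--     'GRU': 'South America', 'EZE': 'South America', 'BOG': 'South America', 'LIM': 'South America',
--     'SCL': 'South America', 'GIG': 'South America', 'CUN': 'Central America', 'MEX': 'Central America',
--     'SJO': 'Central America', 'PTY': 'Central America', 'JNB': 'Africa', 'CPT': 'Africa',
--     'NBO': 'Africa', 'ADD': 'Africa', 'CAI': 'Africa', 'CMN': 'Africa',
-- }
--
--
-- def _airport_region(code):
--     return _CODE_TO_REGION.get(code, 'Other')
-- ===== Notes on version B (the rewrite author's own statement) =====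
-- stated objective: idiomatic
-- what changed: Replaces A's region->list table plus two priority-ordered scan loops with a single flat airport->region literal dict (priority already resolved, each code appears once), so the function body is one dict.get(code, 'Other').
import Mathlib
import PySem

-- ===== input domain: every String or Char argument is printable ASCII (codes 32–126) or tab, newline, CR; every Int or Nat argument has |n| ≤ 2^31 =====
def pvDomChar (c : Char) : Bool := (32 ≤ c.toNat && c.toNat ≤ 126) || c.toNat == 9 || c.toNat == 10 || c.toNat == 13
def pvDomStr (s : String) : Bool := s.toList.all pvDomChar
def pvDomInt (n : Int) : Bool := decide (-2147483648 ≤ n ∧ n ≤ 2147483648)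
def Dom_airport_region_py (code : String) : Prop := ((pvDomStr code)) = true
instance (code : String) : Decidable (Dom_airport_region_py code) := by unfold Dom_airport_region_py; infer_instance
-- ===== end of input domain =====

-- B replaces A's region→list table and two priority-ordered scan loops by a flat,
-- priority-resolved airport→region literal dict, so the function is one dict.get.

-- ===== PORT A =====
def pvRegionAirportsA : PySem.Dict String (List String) := PySem.Dict.ofList
  [ ("US", ["LAX", "SFO", "JFK", "ORD", "DFW", "ATL", "DEN", "SEA", "BOS",
            "MIA", "PHX", "LAS", "MCO", "BWI", "DCA", "IAD", "CLT", "PHL",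
            "EWR", "IAH", "MSP", "DTW", "SAN", "TPA", "SLC", "HNL", "AUS",
            "RDU", "BNA", "PDX", "STL", "SMF", "SJC", "OAK", "FLL", "PIT"]),
    ("Europe", ["LHR", "CDG", "FRA", "AMS", "FCO", "MAD", "BCN", "MUC",
                "ZRH", "VIE", "CPH", "OSL", "ARN", "HEL", "LIS", "DUB",
                "BRU", "MXP", "ATH", "WAW", "PRG", "BUD"]),
    ("Japan", ["NRT", "HND", "ITM", "KIX", "CTS", "FUK", "NGO"]),
    ("Asia", ["NRT", "HND", "ICN", "PVG", "PEK", "BKK", "SIN", "HKG",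
              "KUL", "MNL", "DEL", "BOM", "TPE", "SGN", "HAN"]),
    ("UK", ["LHR", "LGW", "STN", "LTN", "MAN", "EDI"]),
    ("Middle East", ["DXB", "DOH", "AUH", "KWI", "JED", "RUH", "AMM", "TLV"]),
    ("Oceania", ["SYD", "MEL", "BNE", "AKL", "PER"]),
    ("South America", ["GRU", "EZE", "BOG", "LIM", "SCL", "GIG"]),
    ("Central America", ["CUN", "MEX", "SJO", "PTY"]),
    ("Africa", ["JNB", "CPT", "NBO", "ADD", "CAI", "CMN"]) ]

-- the two 'for region in [...]: if code in ...: return region' loops, as first-match searches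
def airport_region_py (code : String) : String :=
  match (["Japan", "UK", "Middle East", "Central America"] : List String).find?
      (fun region => (PySem.Dict.getD pvRegionAirportsA region []).contains code) with
  | some region => region
  | none =>
    match (["US", "Europe", "Asia", "Oceania", "South America", "Africa"] : List String).find?
        (fun region => (PySem.Dict.getD pvRegionAirportsA region []).contains code) with
    | some region => region
    | none => "Other"

-- ===== PORT B =====
-- the flat literal dict _CODE_TO_REGION of Source B
def pvCodeToRegion : PySem.Dict String String := PySem.Dict.ofList
  [     ("LAX", "US"), ("SFO", "US"), ("JFK", "US"),
    ("ORD", "US"), ("DFW", "US"), ("ATL", "US"),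
    ("DEN", "US"), ("SEA", "US"), ("BOS", "US"),
    ("MIA", "US"), ("PHX", "US"), ("LAS", "US"),
    ("MCO", "US"), ("BWI", "US"), ("DCA", "US"),
    ("IAD", "US"), ("CLT", "US"), ("PHL", "US"),
    ("EWR", "US"), ("IAH", "US"), ("MSP", "US"),
    ("DTW", "US"), ("SAN", "US"), ("TPA", "US"),
    ("SLC", "US"), ("HNL", "US"), ("AUS", "US"),
    ("RDU", "US"), ("BNA", "US"), ("PDX", "US"),
    ("STL", "US"), ("SMF", "US"), ("SJC", "US"),
    ("OAK", "US"), ("FLL", "US"), ("PIT", "US"),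
    ("LHR", "UK"), ("CDG", "Europe"), ("FRA", "Europe"),
    ("AMS", "Europe"), ("FCO", "Europe"), ("MAD", "Europe"),
    ("BCN", "Europe"), ("MUC", "Europe"), ("ZRH", "Europe"),
    ("VIE", "Europe"), ("CPH", "Europe"), ("OSL", "Europe"),
    ("ARN", "Europe"), ("HEL", "Europe"), ("LIS", "Europe"),
    ("DUB", "Europe"), ("BRU", "Europe"), ("MXP", "Europe"),
    ("ATH", "Europe"), ("WAW", "Europe"), ("PRG", "Europe"),
    ("BUD", "Europe"), ("NRT", "Japan"), ("HND", "Japan"),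
    ("ITM", "Japan"), ("KIX", "Japan"), ("CTS", "Japan"),
    ("FUK", "Japan"), ("NGO", "Japan"), ("ICN", "Asia"),
    ("PVG", "Asia"), ("PEK", "Asia"), ("BKK", "Asia"),
    ("SIN", "Asia"), ("HKG", "Asia"), ("KUL", "Asia"),
    ("MNL", "Asia"), ("DEL", "Asia"), ("BOM", "Asia"),
    ("TPE", "Asia"), ("SGN", "Asia"), ("HAN", "Asia"),
    ("LGW", "UK"), ("STN", "UK"), ("LTN", "UK"),
    ("MAN", "UK"), ("EDI", "UK"), ("DXB", "Middle East"),
    ("DOH", "Middle East"), ("AUH", "Middle East"), ("KWI", "Middle East"),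
    ("JED", "Middle East"), ("RUH", "Middle East"), ("AMM", "Middle East"),
    ("TLV", "Middle East"), ("SYD", "Oceania"), ("MEL", "Oceania"),
    ("BNE", "Oceania"), ("AKL", "Oceania"), ("PER", "Oceania"),
    ("GRU", "South America"), ("EZE", "South America"), ("BOG", "South America"),
    ("LIM", "South America"), ("SCL", "South America"), ("GIG", "South America"),
    ("CUN", "Central America"), ("MEX", "Central America"), ("SJO", "Central America"),
    ("PTY", "Central America"), ("JNB", "Africa"), ("CPT", "Africa"),
    ("NBO", "Africa"), ("ADD", "Africa"), ("CAI", "Africa"),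
    ("CMN", "Africa") ]

def airport_region_py_alt (code : String) : String :=
  PySem.Dict.getD pvCodeToRegion code "Other"

-- ===== PRECONDITION & SPEC =====
def Spec_airport_region_py (code : String) (out : String) : Prop := out = airport_region_py_alt code
instance (code : String) (out : String) : Decidable (Spec_airport_region_py code out) := by unfold Spec_airport_region_py; infer_instance

-- ===== CLAIM =====
def Claim_equal_airport_region_py : Prop := ∀ (code : String), Dom_airport_region_py code → Spec_airport_region_py code (airport_region_py code)

-- ===== LEMMAS AND PROOFS =====

-- all airport codes appearing anywhere in A's table
def pvAllCodes : List String := (PySem.Dict.values pvRegionAirportsA).flatten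

set_option maxRecDepth 100000 in
lemma pv_mem_case : ∀ c ∈ pvAllCodes, airport_region_py c = airport_region_py_alt c := by
  decide

set_option maxRecDepth 100000 in
lemma pv_keys_sub : ∀ k ∈ PySem.Dict.keys pvCodeToRegion, k ∈ pvAllCodes := by
  decide

lemma pv_notmem_A (code : String) (h : code ∉ pvAllCodes) :
    airport_region_py code = "Other" := by
  have hne : ∀ l ∈ PySem.Dict.values pvRegionAirportsA, code ∉ l := by
    intro l hl hc
    exact h (List.mem_flatten.mpr ⟨l, hl, hc⟩)
  have hall : ∀ (r : String), code ∉ PySem.Dict.getD pvRegionAirportsA r [] := by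
    intro r hc
    rcases hv : PySem.Dict.get? pvRegionAirportsA r with _ | l <;>
      rw [PySem.Dict.getD_eq_get?_getD, hv] at hc
    · exact absurd hc (List.not_mem_nil)
    · refine hne l ?_ hc
      have hi := PySem.Dict.mem_items_of_get?_eq_some (d := pvRegionAirportsA) hv
      simp only [PySem.Dict.values]
      exact List.mem_map.mpr ⟨(r, l), hi, rfl⟩
  unfold airport_region_py
  simp [List.find?, hall]

lemma pv_notmem_B (code : String) (h : code ∉ pvAllCodes) :
    airport_region_py_alt code = "Other" := by
  unfold airport_region_py_alt
  apply PySem.Dict.getD_of_not_contains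
  rw [PySem.Dict.contains_eq_decide_mem_keys]
  simp only [decide_eq_false_iff_not]
  intro hk
  exact h (pv_keys_sub _ hk)

-- ===== VERDICT =====
theorem airport_region_py_spec : Claim_equal_airport_region_py := by
  intro code _
  unfold Spec_airport_region_py
  by_cases h : code ∈ pvAllCodes
  · exact pv_mem_case code h
  · rw [pv_notmem_A code h, pv_notmem_B code h]
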